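-- pv_equiv track=rewrite | github.com/The220th/MQDP | MQDP_standards/standardk.py | replace_equally
-- ===== SOURCE A (Python) =====
-- def replace_equally(Q : str) -> str: # =
--     res = ""
--     for i in range(len(Q)):
--         if(Q[i] == '='):
--             if(i > 0 and Q[i-1] == '\\'):
--                 res += Q[i]
--             else:
--                 res += "\\="
--         else:
--             res += Q[i]
--     return res
-- ===== SOURCE B (Python) =====
-- def replace_equally(Q : str) -> str: # =
--     # Forward scan that consumes an already-escaped "\=" pair as a unit,
--     # collecting chunks and joining once (instead of index lookback + string +=).
--     out = []
--     i = 0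
--     n = len(Q)
--     while i < n:
--         if Q[i] == '\\' and i + 1 < n and Q[i + 1] == '=':
--             out.append('\\=')
--             i += 2
--         elif Q[i] == '=':
--             out.append('\\=')
--             i += 1
--         else:
--             out.append(Q[i])
--             i += 1
--     return ''.join(out)
-- ===== Notes on version B (the rewrite author's own statement) =====
-- stated objective: alternative
-- what changed: B replaces A's per-index loop that looks back at the previous character by a forward scan that consumes an already-escaped backslash-equals pair as a single unit, appending chunks to a list joined once.
import Mathlib
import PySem

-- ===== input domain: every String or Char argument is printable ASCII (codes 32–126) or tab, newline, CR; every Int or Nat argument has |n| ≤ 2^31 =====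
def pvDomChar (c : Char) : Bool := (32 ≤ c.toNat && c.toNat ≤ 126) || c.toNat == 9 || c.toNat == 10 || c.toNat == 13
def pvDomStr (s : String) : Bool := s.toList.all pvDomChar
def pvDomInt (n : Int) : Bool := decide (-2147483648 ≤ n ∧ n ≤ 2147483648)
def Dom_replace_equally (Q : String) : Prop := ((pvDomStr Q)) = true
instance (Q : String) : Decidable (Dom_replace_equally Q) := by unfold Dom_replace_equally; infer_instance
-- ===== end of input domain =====

-- B escapes unescaped '=' by a forward scan consuming an already-escaped backslash-equals pair as a unit, instead of A's index loop with lookback; same output.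

-- ===== PORT A =====
def replace_equally (Q : String) : String :=
  String.ofList <|
    (PySem.List.pyRange 0 Q.toList.length 1).foldl (fun res i =>
      if PySem.List.pyGetD Q.toList i ' ' = '=' then
        if 0 < i ∧ PySem.List.pyGetD Q.toList (i - 1) ' ' = '\\' then
          res ++ [PySem.List.pyGetD Q.toList i ' ']
        else
          res ++ ['\\', '=']
      else
        res ++ [PySem.List.pyGetD Q.toList i ' ']) []

-- ===== PORT B =====
-- the while loop of Source B as the obvious structural recursion consuming 1 or 2 chars
def replaceEquallyAltGo : List Char → List Char
  | '\\' :: '=' :: r => '\\' :: '=' :: replaceEquallyAltGo r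
  | '=' :: r => '\\' :: '=' :: replaceEquallyAltGo r
  | c :: r => c :: replaceEquallyAltGo r
  | [] => []

def replace_equally_alt (Q : String) : String :=
  String.ofList (replaceEquallyAltGo Q.toList)

-- ===== PRECONDITION & SPEC =====
def Spec_replace_equally (Q : String) (out : String) : Prop := out = replace_equally_alt Q
instance (Q : String) (out : String) : Decidable (Spec_replace_equally Q out) := by unfold Spec_replace_equally; infer_instance

-- ===== CLAIM (what is proved, stated in full; the proofs are below) =====
def Claim_equal_replace_equally : Prop := ∀ (Q : String), Dom_replace_equally Q → Spec_replace_equally Q (replace_equally Q)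

-- ===== LEMMAS AND PROOFS =====

-- A's loop, rephrased as recursion carrying the previous character
def aGo (prev : Option Char) : List Char → List Char
  | [] => []
  | c :: r =>
    (if c = '=' then (if prev = some '\\' then ['='] else ['\\', '=']) else [c]) ++ aGo (some c) r

def prevAt (s : List Char) (k : Nat) : Option Char :=
  if k = 0 then none else s[k - 1]?

lemma aGo_loop (s : List Char) (m k : Nat) (hm : m = s.length - k) (hk : k ≤ s.length)
    (acc : List Char) :
    (PySem.List.pyRange (k : Int) (s.length : Int) 1).foldl (fun res i =>
      if PySem.List.pyGetD s i ' ' = '=' then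
        if 0 < i ∧ PySem.List.pyGetD s (i - 1) ' ' = '\\' then
          res ++ [PySem.List.pyGetD s i ' ']
        else
          res ++ ['\\', '=']
      else
        res ++ [PySem.List.pyGetD s i ' ']) acc
    = acc ++ aGo (prevAt s k) (s.drop k) := by
  induction m generalizing k acc with
  | zero =>
    have hk' : k = s.length := by omega
    subst hk'
    rw [PySem.List.pyRange_one_eq_nil (by omega)]
    simp [aGo]
  | succ m ih =>
    have hlt : k < s.length := by omega
    rw [PySem.List.pyRange_one_cons (by exact_mod_cast hlt)]
    simp only [List.foldl_cons]
    have hget : PySem.List.pyGetD s (k : Int) ' ' = s[k] := by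
      rw [PySem.List.pyGetD_natCast, List.getD_eq_getElem s ' ' hlt]
    have hdrop : s.drop k = s[k] :: s.drop (k + 1) := (List.getElem_cons_drop hlt).symm
    have hstep : ((k : Int) + 1) = ((k + 1 : Nat) : Int) := by push_cast; ring
    rw [hstep, ih (k + 1) (by omega) (by omega)]
    rw [hdrop]
    have hprev1 : prevAt s (k + 1) = some s[k] := by
      simp [prevAt, hlt]
    rw [hprev1]
    by_cases he : s[k] = '='
    · by_cases hp : 0 < k
      · have hklt : k - 1 < s.length := by omega
        have hm1 : (k : Int) - 1 = ((k - 1 : Nat) : Int) := by push_cast [hp]; ring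
        have hgetp : PySem.List.pyGetD s ((k : Int) - 1) ' ' = s[k - 1] := by
          rw [hm1, PySem.List.pyGetD_natCast, List.getD_eq_getElem s ' ' hklt]
        have hprev : prevAt s k = some s[k - 1] := by
          simp [prevAt]; omega
        by_cases hb : s[k - 1] = '\\'
        · rw [hget]
          simp [he, hgetp, hb, hp, aGo, hprev, List.append_assoc]
        · rw [hget]
          simp [he, hgetp, hb, aGo, hprev, List.append_assoc]
      · have hk0 : k = 0 := by omega
        subst hk0
        rw [hget]
        simp [he, aGo, prevAt, List.append_assoc]
    · rw [hget]
      simp [he, aGo, List.append_assoc]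

lemma aGo_eq_altGo (s : List Char) :
    ∀ prev : Option Char, (prev = some '\\' → s.head? ≠ some '=') →
      aGo prev s = replaceEquallyAltGo s := by
  have hbe : ('\\' : Char) ≠ '=' := by decide
  induction s using replaceEquallyAltGo.induct with
  | case1 r ih =>
    intro prev _
    simp [aGo, replaceEquallyAltGo, hbe, ih (some '=') (by simp)]
  | case2 r ih =>
    intro prev hprev
    have hne : prev ≠ some '\\' := fun hc => (hprev hc) (by simp)
    simp [aGo, replaceEquallyAltGo, hne, ih (some '=') (by simp)]
  | case3 c r h1 h2 ih =>
    intro prev _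
    have hc : c ≠ '=' := h2
    have hr : (some c = some '\\' → r.head? ≠ some '=') := by
      intro hcb hh
      have hcb' : c = '\\' := by injection hcb
      cases r with
      | nil => simp at hh
      | cons d r' =>
        simp at hh
        subst hh
        exact h1 r' hcb' rfl
    have hcase : replaceEquallyAltGo (c :: r) = c :: replaceEquallyAltGo r := by
      cases r with
      | nil => simp [replaceEquallyAltGo]
      | cons d r' =>
        by_cases hcb : c = '\\'
        · have hd : d ≠ '=' := by
            intro hd; exact h1 r' hcb (by rw [hd])
          subst hcb
          simp [replaceEquallyAltGo]
        · simp [replaceEquallyAltGo]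
    rw [hcase]
    simp [aGo, hc, ih (some c) hr]
  | case4 => intro prev _; simp [aGo, replaceEquallyAltGo]

-- ===== VERDICT (by name: the statement is the Claim_ definition above) =====
theorem replace_equally_spec : Claim_equal_replace_equally := by
  intro Q _
  unfold Spec_replace_equally replace_equally replace_equally_alt
  have h := aGo_loop Q.toList Q.toList.length 0 (by omega) (by omega) []
  simp only [Nat.cast_zero] at h
  rw [h]
  simp only [List.nil_append, List.drop_zero, show prevAt Q.toList 0 = none from rfl]
  rw [aGo_eq_altGo Q.toList none (by simp)]
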